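-- pv_equiv track=rewrite | github.com/hitanshicodes/AgroGyanGPT-Smart-Agricultural-Assistant | backend/intelligence.py | simplify_text
-- ===== SOURCE A (Python) =====
-- def simplify_text(text: str) -> str:
--     text = (text or "").strip()
--     if not text:
--         return "No answer found."
--     replacements = {
--         "approximately": "about",
--         "cultivation": "farming",
--         "application": "use",
--         "recommended": "best",
--         "irrigation": "watering",
--         "nutrient": "plant food",
--     }
--     simplified = text
--     for source, target in replacements.items():
--         simplified = simplified.replace(source, target).replace(source.title(), target.title())
--     if len(simplified) > 220:
--         simplified = simplified[:217].rstrip() + "..."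
--     return f"Simple answer: {simplified}"
-- ===== SOURCE B (Python) =====
-- import re
--
-- def simplify_text(text: str) -> str:
--     text = (text or "").strip()
--     if not text:
--         return "No answer found."
--     replacements = {
--         "approximately": "about",
--         "cultivation": "farming",
--         "application": "use",
--         "recommended": "best",
--         "irrigation": "watering",
--         "nutrient": "plant food",
--     }
--     table = {}
--     for source, target in replacements.items():
--         table[source] = target
--         table[source.title()] = target.title()
--     pattern = re.compile("|".join(re.escape(key) for key in table))
--     simplified = pattern.sub(lambda m: table[m.group(0)], text)
--     if len(simplified) > 220:
--         simplified = simplified[:217].rstrip() + "..."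
--     return f"Simple answer: {simplified}"
-- ===== Notes on version B (the rewrite author's own statement) =====
-- stated objective: idiomatic
-- what changed: B builds one lookup table containing each source and its title-cased form, compiles a single regex alternation of those literal keys and rewrites the text in one left-to-right re.sub pass with a table lookup per match, instead of A's twelve full-string str.replace passes.
import Mathlib
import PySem

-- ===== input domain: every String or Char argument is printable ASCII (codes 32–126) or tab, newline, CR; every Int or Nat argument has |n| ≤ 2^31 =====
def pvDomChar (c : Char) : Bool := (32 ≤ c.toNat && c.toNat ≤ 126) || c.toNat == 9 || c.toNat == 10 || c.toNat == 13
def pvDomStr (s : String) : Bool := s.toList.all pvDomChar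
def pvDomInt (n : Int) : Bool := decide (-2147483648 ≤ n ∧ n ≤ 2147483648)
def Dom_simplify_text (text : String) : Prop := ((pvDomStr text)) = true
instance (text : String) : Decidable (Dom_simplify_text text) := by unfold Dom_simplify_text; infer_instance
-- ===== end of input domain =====

-- B replaces A's twelve sequential full-string str.replace passes by one left-to-right
-- rewriting pass driven by a single table of all twelve literal keys (a compiled regex
-- alternation in Python); same result, more idiomatic single-pass structure (not faster).

-- ===== PORT A =====

-- Python str.title(), hand-ported character by character (exact on the ASCII domain:
-- 'cased' = ASCII letter, first letter of each run uppercased, the rest lowercased).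
def pyTitleGo : Bool → List Char → List Char
  | _, [] => []
  | prevCased, c :: t =>
    let lo : Bool := 'a' ≤ c && c ≤ 'z'
    let hi : Bool := 'A' ≤ c && c ≤ 'Z'
    let c' : Char :=
      if lo then (if prevCased then c else Char.ofNat (c.toNat - 32))
      else if hi then (if prevCased then Char.ofNat (c.toNat + 32) else c)
      else c
    c' :: pyTitleGo (lo || hi) t

def pyTitle (s : String) : String := String.ofList (pyTitleGo false s.toList)

def replacementsA : List (String × String) :=
  [("approximately", "about"), ("cultivation", "farming"), ("application", "use"),
   ("recommended", "best"), ("irrigation", "watering"), ("nutrient", "plant food")]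

def simplify_text (text : String) : String :=
  let text := PySem.Str.strip (if text = "" then "" else text)
  if text = "" then "No answer found."
  else
    let simplified := replacementsA.foldl
      (fun s p => PySem.Str.replace (PySem.Str.replace s p.1 p.2) (pyTitle p.1) (pyTitle p.2))
      text
    let simplified := if PySem.Str.len simplified > 220 then
        PySem.Str.rstrip (PySem.Str.slice simplified none (some 217)) ++ "..." else simplified
    "Simple answer: " ++ simplified

-- ===== PORT B =====

def replacementsB : List (String × String) :=
  [("approximately", "about"), ("cultivation", "farming"), ("application", "use"),
   ("recommended", "best"), ("irrigation", "watering"), ("nutrient", "plant food")]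

-- pattern.sub with an alternation of re.escape'd literal keys, replacement = table[match]:
-- the regex matches at the leftmost position where any key is a substring, trying the
-- alternatives in table order there; the sub callback emits that key's table value and the
-- scan resumes after the match.  Ported as a single left-to-right scan (exact: the keys are
-- escaped literals, so the alternation has no other regex behaviour).
def subScan (ps : List (String × String)) : List Char → List Char
  | [] => []
  | c :: t =>
    match ps.find? (fun p => p.1.toList.isPrefixOf (c :: t)) with
    | some p => p.2.toList ++ subScan ps (t.drop (p.1.toList.length - 1))
    | none => c :: subScan ps t
termination_by s => s.length
decreasing_by all_goals (first | (simp; omega) | simp)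

def simplify_text_alt (text : String) : String :=
  let text := PySem.Str.strip (if text = "" then "" else text)
  if text = "" then "No answer found."
  else
    -- Python dict 'table' as an association list; all inserted keys are fresh, so each
    -- insertion appends.
    let table := replacementsB.foldl
      (fun acc p => acc ++ [(p.1, p.2), (pyTitle p.1, pyTitle p.2)]) []
    let simplified := String.ofList (subScan table text.toList)
    let simplified := if PySem.Str.len simplified > 220 then
        PySem.Str.rstrip (PySem.Str.slice simplified none (some 217)) ++ "..." else simplified
    "Simple answer: " ++ simplified

-- ===== PRECONDITION & SPEC =====
def Spec_simplify_text (text : String) (out : String) : Prop := out = simplify_text_alt text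
instance (text : String) (out : String) : Decidable (Spec_simplify_text text out) := by unfold Spec_simplify_text; infer_instance

-- ===== CLAIM (what is proved, stated in full; the proofs are below) =====
def Claim_equal_simplify_text : Prop := ∀ (text : String), Dom_simplify_text text → Spec_simplify_text text (simplify_text text)

-- ===== LEMMAS AND PROOFS =====

-- Structural form of Python's str.replace (leftmost, non-overlapping).
def rep (k v : List Char) : List Char → List Char
  | [] => []
  | c :: t =>
    if k.isPrefixOf (c :: t) then v ++ rep k v (t.drop (k.length - 1))
    else c :: rep k v t
termination_by s => s.length
decreasing_by all_goals (first | (simp; omega) | simp)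

-- the twelve (key, value) pairs, in the order both programs use them, at List Char level
def tableLit : List (String × String) :=
  [("approximately", "about"), ("Approximately", "About"),
   ("cultivation", "farming"), ("Cultivation", "Farming"),
   ("application", "use"), ("Application", "Use"),
   ("recommended", "best"), ("Recommended", "Best"),
   ("irrigation", "watering"), ("Irrigation", "Watering"),
   ("nutrient", "plant food"), ("Nutrient", "Plant Food")]

def P : List (List Char × List Char) := tableLit.map (fun p => (p.1.toList, p.2.toList))

def foldRep (ps : List (List Char × List Char)) (cs : List Char) : List Char :=
  ps.foldl (fun s p => rep p.1 p.2 s) cs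

-- char-level twin of subScan
def scanC (ps : List (List Char × List Char)) : List Char → List Char
  | [] => []
  | c :: t =>
    match ps.find? (fun p => p.1.isPrefixOf (c :: t)) with
    | some p => p.2 ++ scanC ps (t.drop (p.1.length - 1))
    | none => c :: scanC ps t
termination_by s => s.length
decreasing_by all_goals (first | (simp; omega) | simp)

-- nonempty proper suffixes of the keys
def propSuff (k : List Char) : List (List Char) :=
  k.tails.filter (fun b => !b.isEmpty && b ≠ k)
def SuffList (ps : List (List Char × List Char)) : List (List Char) :=
  ps.flatMap (fun p => propSuff p.1)
-- nonempty suffixes of the values (including the full value)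
def TgtSuff (ps : List (List Char × List Char)) : List (List Char) :=
  ps.flatMap (fun p => p.2.tails.filter (fun b => !b.isEmpty))

-- basic rep equations
theorem rep_nil (k v : List Char) : rep k v [] = [] := by simp [rep]

theorem rep_cons_neg (k v : List Char) (c : Char) (t : List Char) (h : ¬ k <+: (c :: t)) :
    rep k v (c :: t) = c :: rep k v t := by
  rw [rep]
  simp only [List.isPrefixOf_iff_prefix]
  rw [if_neg h]

theorem rep_pos (k v x : List Char) (hk : k ≠ []) :
    rep k v (k ++ x) = v ++ rep k v x := by
  obtain ⟨a, k', rfl⟩ := List.exists_cons_of_ne_nil hk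
  rw [List.cons_append, rep]
  simp only [List.isPrefixOf_iff_prefix]
  rw [if_pos (by rw [← List.cons_append]; exact List.prefix_append _ _)]
  have : (k' ++ x).drop ((a :: k').length - 1) = x := by
    simp [List.drop_left]
  rw [this]

theorem prefix_append_cases {k a b : List Char} (h : k <+: a ++ b) : k <+: a ∨ a <+: k := by
  rcases le_or_gt k.length a.length with hle | hlt
  · exact Or.inl (List.prefix_of_prefix_length_le h (a.prefix_append b) hle)
  · exact Or.inr (List.prefix_of_prefix_length_le (a.prefix_append b) h (le_of_lt hlt))

theorem mem_SuffList {ps : List (List Char × List Char)} {b : List Char} :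
    b ∈ SuffList ps ↔ ∃ p ∈ ps, b <:+ p.1 ∧ b ≠ [] ∧ b ≠ p.1 := by
  simp [SuffList, propSuff, List.mem_flatMap, List.mem_filter, List.mem_tails]

theorem mem_TgtSuff {ps : List (List Char × List Char)} {u : List Char} :
    u ∈ TgtSuff ps ↔ ∃ p ∈ ps, u <:+ p.2 ∧ u ≠ [] := by
  simp [TgtSuff, List.mem_flatMap, List.mem_filter, List.mem_tails]

theorem suff_ne_nil {ps : List (List Char × List Char)} {b : List Char}
    (hb : b ∈ SuffList ps) : b ≠ [] := by
  obtain ⟨p, _, _, h, _⟩ := mem_SuffList.mp hb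
  exact h

theorem suff_drop {ps : List (List Char × List Char)} {b : List Char} {j : Nat}
    (hb : b ∈ SuffList ps) (h : b.drop j ≠ []) : b.drop j ∈ SuffList ps := by
  obtain ⟨p, hp, hs, hne, hpr⟩ := mem_SuffList.mp hb
  refine mem_SuffList.mpr ⟨p, hp, (List.drop_suffix j b).trans hs, h, ?_⟩
  have h1 : b.length < p.1.length := by
    rcases lt_or_eq_of_le hs.length_le with h' | h'
    · exact h'
    · exact absurd (List.IsSuffix.eq_of_length hs h') hpr
  have h2 : (b.drop j).length ≤ b.length := by simp
  intro he
  rw [he] at h2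
  omega

theorem suff_of_mem {ps : List (List Char × List Char)} {p : List Char × List Char}
    {b : List Char} (hp : p ∈ ps) (hs : b <:+ p.1) (hne : b ≠ []) (hpr : b ≠ p.1) :
    b ∈ SuffList ps := mem_SuffList.mpr ⟨p, hp, hs, hne, hpr⟩

-- no nonempty element of SuffList can be a prefix of (rep k v x) unless it is a prefix of x
theorem star {ps : List (List Char × List Char)}
    (hD : ∀ p ∈ ps, ∀ b ∈ SuffList ps, ¬ b <+: p.2 ∧ ¬ p.2 <+: b)
    {p : List Char × List Char} (hp : p ∈ ps) :
    ∀ n cs, cs.length ≤ n → ∀ b ∈ SuffList ps, b <+: rep p.1 p.2 cs → b <+: cs := by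
  intro n
  induction n with
  | zero =>
      intro cs hl b hb h
      have : cs = [] := List.length_eq_zero_iff.mp (Nat.le_zero.mp hl)
      subst this
      rw [rep_nil] at h
      exact h
  | succ n ih =>
      intro cs hl b hb h
      cases cs with
      | nil => rw [rep_nil] at h; exact h
      | cons c t =>
          by_cases hpre : p.1 <+: (c :: t)
          · -- rep emits the target v first; no SuffList element can start there
            exfalso
            rw [rep] at h
            rw [List.isPrefixOf_iff_prefix.symm] at hpre
            rw [if_pos hpre] at h
            rcases prefix_append_cases h with h' | h'
            · exact (hD p hp b hb).1 h'
            · exact (hD p hp b hb).2 h'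
          · rw [rep_cons_neg _ _ _ _ hpre] at h
            cases b with
            | nil => exact absurd rfl (suff_ne_nil hb)
            | cons b0 b' =>
                obtain ⟨hb0, hb'⟩ : b0 = c ∧ b' <+: rep p.1 p.2 t := by
                  rcases h with ⟨e, he⟩
                  simp at he
                  exact ⟨he.1, ⟨e, he.2⟩⟩
                subst hb0
                cases hb'' : b' with
                | nil => subst hb''; exact ⟨t, rfl⟩
                | cons x xs =>
                    rw [← hb'']
                    have hbmem : b' ∈ SuffList ps := by
                      have := suff_drop (j := 1) hb (by simp [hb''])
                      simpa using this
                    have := ih t (by simpa using Nat.lt_succ_iff.mp (by simpa using hl)) b' hbmem hb'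
                    exact ⟨this.choose, by simp [this.choose_spec]⟩

theorem skip (k v : List Char) :
    ∀ w x, (∀ p' < w.length, ¬ k <+: (w.drop p' ++ x)) → rep k v (w ++ x) = w ++ rep k v x := by
  intro w
  induction w with
  | nil => intro x _; rfl
  | cons c w ih =>
      intro x h
      have h0 : ¬ k <+: (c :: (w ++ x)) := by
        have := h 0 (by simp)
        simpa using this
      rw [List.cons_append, rep_cons_neg _ _ _ _ h0, ih x (fun p' hp' => by
        have := h (p' + 1) (by simp; omega)
        simpa using this), List.cons_append]

theorem consFold {ps : List (List Char × List Char)}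
    (hD : ∀ p ∈ ps, ∀ b ∈ SuffList ps, ¬ b <+: p.2 ∧ ¬ p.2 <+: b)
    (c : Char) (t : List Char) :
    ∀ qs, (∀ p ∈ qs, p ∈ ps) → (∀ p ∈ qs, ¬ p.1 <+: (c :: t)) →
    ∀ y, (∀ b ∈ SuffList ps, b <+: y → b <+: t) →
    foldRep qs (c :: y) = c :: foldRep qs y := by
  intro qs
  induction qs with
  | nil => intro _ _ y _; rfl
  | cons q qs ih =>
      intro hsub hq y hy
      have hnp : ¬ q.1 <+: (c :: y) := by
        intro hc
        cases hk : q.1 with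
        | nil => exact hq q (by simp) (by simp [hk])
        | cons a k' =>
            rw [hk] at hc
            obtain ⟨ha, hk'⟩ : a = c ∧ k' <+: y := by
              rcases hc with ⟨e, he⟩
              simp at he
              exact ⟨he.1, ⟨e, he.2⟩⟩
            subst ha
            cases hk2 : k' with
            | nil =>
                refine hq q (by simp) ?_
                rw [hk, hk2]
                exact ⟨t, rfl⟩
            | cons x xs =>
                have hkm : k' ∈ SuffList ps := by
                  refine suff_of_mem (hsub q (by simp)) ?_ (by simp [hk2]) ?_
                  · rw [hk]; exact ⟨[a], rfl⟩
                  · rw [hk]; intro hcon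
                    have := congrArg List.length hcon
                    simp at this
                have := hy k' hkm hk'
                refine hq q (by simp) ?_
                rw [hk]
                rcases this with ⟨e, he⟩
                exact ⟨e, by simp [← he]⟩
      show foldRep qs (rep q.1 q.2 (c :: y)) = c :: foldRep qs (rep q.1 q.2 y)
      rw [rep_cons_neg _ _ _ _ hnp]
      exact ih (fun p hp => hsub p (by simp [hp])) (fun p hp => hq p (by simp [hp]))
        (rep q.1 q.2 y)
        (fun b hb hpre => hy b hb (star hD (hsub q (by simp)) _ _ le_rfl b hb hpre))

theorem skipFold {ps : List (List Char × List Char)}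
    (hD : ∀ p ∈ ps, ∀ b ∈ SuffList ps, ¬ b <+: p.2 ∧ ¬ p.2 <+: b)
    (hC1 : ∀ p ∈ ps, ∀ b ∈ SuffList ps, ¬ p.1 <+: b)
    {km vm : List Char} (hkm : (km, vm) ∈ ps) (hkne : km ≠ []) (rest : List Char) :
    ∀ qs, (∀ p ∈ qs, p ∈ ps) → (∀ p ∈ qs, ¬ p.1 <+: (km ++ rest)) →
    (∀ p ∈ qs, ∀ b ∈ propSuff km, ¬ b <+: p.1) →
    ∀ y, (∀ b ∈ SuffList ps, b <+: y → b <+: rest) →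
    foldRep qs (km ++ y) = km ++ foldRep qs y := by
  intro qs
  induction qs with
  | nil => intro _ _ _ y _; rfl
  | cons q qs ih =>
      intro hsub hq hR y hy
      have hskip : rep q.1 q.2 (km ++ y) = km ++ rep q.1 q.2 y := by
        apply skip
        intro p' hp' hc
        rcases prefix_append_cases hc with h' | h'
        · -- the whole of q.1 lies inside km
          rcases Nat.eq_zero_or_pos p' with rfl | hpos
          · simp at h'
            exact hq q (by simp) (h'.trans (List.prefix_append _ _))
          · have hbm : km.drop p' ∈ SuffList ps := by
              refine suff_of_mem hkm (List.drop_suffix _ _) ?_ ?_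
              · intro hz
                have := congrArg List.length hz
                simp at this
                omega
              · intro hz
                have := congrArg List.length hz
                simp at this
                omega
            exact hC1 q (hsub q (by simp)) _ hbm h'
        · -- km.drop p' is a prefix of q.1
          obtain ⟨e, he⟩ := h'
          have he' : e <+: y := by
            rw [← he] at hc
            exact (List.prefix_append_right_inj _).mp hc
          rcases Nat.eq_zero_or_pos p' with rfl | hpos
          · simp at he
            cases he2 : e with
            | nil =>
                subst he2
                simp at he
                exact hq q (by simp) (by rw [← he]; exact List.prefix_append _ _)
            | cons x xs =>
                have hem : e ∈ SuffList ps := by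
                  refine suff_of_mem (p := q) (hsub q (by simp)) ?_ (by simp [he2]) ?_
                  · rw [← he]; exact ⟨km, rfl⟩
                  · rw [← he]; intro hcon
                    have h1 := congrArg List.length hcon
                    simp at h1
                    exact hkne h1
                have := hy e hem he'
                refine hq q (by simp) ?_
                rw [← he]
                rcases this with ⟨f, hf⟩
                exact ⟨f, by simp [← hf]⟩
          · -- p' > 0 : km.drop p' is a nonempty proper suffix of km
            have h1 : km.drop p' ≠ [] := by
              intro hz
              have := congrArg List.length hz
              simp at this
              omega
            have h2 : km.drop p' ≠ km := by
              intro hz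
              have := congrArg List.length hz
              simp at this
              omega
            refine hR q (by simp) (km.drop p') ?_ ⟨e, he⟩
            simp only [propSuff, List.mem_filter, List.mem_tails]
            exact ⟨List.drop_suffix _ _, by simp [h1, h2]⟩
      show foldRep qs (rep q.1 q.2 (km ++ y)) = km ++ foldRep qs (rep q.1 q.2 y)
      rw [hskip]
      exact ih (fun p hp => hsub p (by simp [hp])) (fun p hp => hq p (by simp [hp]))
        (fun p hp => hR p (by simp [hp])) (rep q.1 q.2 y)
        (fun b hb hpre => hy b hb (star hD (hsub q (by simp)) _ _ le_rfl b hb hpre))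

theorem skipTgt {ps : List (List Char × List Char)}
    (hE : ∀ p ∈ ps, ∀ u ∈ TgtSuff ps, ¬ p.1 <+: u ∧ ¬ u <+: p.1)
    {km vm : List Char} (hkm : (km, vm) ∈ ps) :
    ∀ qs, (∀ p ∈ qs, p ∈ ps) → ∀ z, foldRep qs (vm ++ z) = vm ++ foldRep qs z := by
  intro qs
  induction qs with
  | nil => intro _ z; rfl
  | cons q qs ih =>
      intro hsub z
      have hskip : rep q.1 q.2 (vm ++ z) = vm ++ rep q.1 q.2 z := by
        apply skip
        intro p' hp' hc
        have hum : vm.drop p' ∈ TgtSuff ps := by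
          refine mem_TgtSuff.mpr ⟨(km, vm), hkm, List.drop_suffix _ _, ?_⟩
          intro hz
          have := congrArg List.length hz
          simp at this
          omega
        rcases prefix_append_cases hc with h' | h'
        · exact (hE q (hsub q (by simp)) _ hum).1 h'
        · exact (hE q (hsub q (by simp)) _ hum).2 h'
      show foldRep qs (rep q.1 q.2 (vm ++ z)) = vm ++ foldRep qs (rep q.1 q.2 z)
      rw [hskip]
      exact ih (fun p hp => hsub p (by simp [hp])) (rep q.1 q.2 z)

theorem foldRep_nil_input (qs : List (List Char × List Char)) : foldRep qs [] = [] := by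
  induction qs with
  | nil => rfl
  | cons q qs ih => simpa [foldRep, List.foldl_cons, rep_nil] using ih

theorem scanC_cons_some {ps : List (List Char × List Char)} {c : Char} {t : List Char}
    {p : List Char × List Char}
    (hf : ps.find? (fun p => p.1.isPrefixOf (c :: t)) = some p) :
    scanC ps (c :: t) = p.2 ++ scanC ps (t.drop (p.1.length - 1)) := by
  rw [scanC, hf]

theorem scanC_cons_none {ps : List (List Char × List Char)} {c : Char} {t : List Char}
    (hf : ps.find? (fun p => p.1.isPrefixOf (c :: t)) = none) :
    scanC ps (c :: t) = c :: scanC ps t := by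
  rw [scanC, hf]

-- the heart: the sequence of str.replace passes equals the single left-to-right scan
theorem main {ps : List (List Char × List Char)}
    (hNE : ∀ p ∈ ps, p.1 ≠ [])
    (hD : ∀ p ∈ ps, ∀ b ∈ SuffList ps, ¬ b <+: p.2 ∧ ¬ p.2 <+: b)
    (hE : ∀ p ∈ ps, ∀ u ∈ TgtSuff ps, ¬ p.1 <+: u ∧ ¬ u <+: p.1)
    (hC1 : ∀ p ∈ ps, ∀ b ∈ SuffList ps, ¬ p.1 <+: b)
    (hC3 : ps.Pairwise (fun p q => ∀ b ∈ propSuff q.1, ¬ b <+: p.1)) :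
    ∀ n cs, cs.length ≤ n → foldRep ps cs = scanC ps cs := by
  intro n
  induction n with
  | zero =>
      intro cs hl
      have : cs = [] := List.length_eq_zero_iff.mp (Nat.le_zero.mp hl)
      subst this
      rw [foldRep_nil_input, scanC]
  | succ n ih =>
      intro cs hl
      cases cs with
      | nil => rw [foldRep_nil_input, scanC]
      | cons c t =>
          cases hf : ps.find? (fun p => p.1.isPrefixOf (c :: t)) with
          | none =>
              rw [scanC_cons_none hf]
              have hq : ∀ p ∈ ps, ¬ p.1 <+: (c :: t) := by
                intro p hp
                have := List.find?_eq_none.mp hf p hp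
                rw [← List.isPrefixOf_iff_prefix]
                simp [this]
              rw [consFold hD c t ps (fun p hp => hp) hq t (fun _ _ h => h)]
              rw [ih t (by simpa using Nat.lt_succ_iff.mp (by simpa using hl))]
          | some pm =>
              obtain ⟨hpred, l₁, l₂, hps, hl₁⟩ := List.find?_eq_some_iff_append.mp hf
              have hpm : pm.1 <+: (c :: t) := List.isPrefixOf_iff_prefix.mp hpred
              have hpmem : pm ∈ ps := by rw [hps]; simp
              have hkne : pm.1 ≠ [] := hNE pm hpmem
              -- decompose the input after the match
              obtain ⟨rest, hrest⟩ := hpm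
              have hq1 : ∀ p ∈ l₁, ¬ p.1 <+: (pm.1 ++ rest) := by
                intro p hp
                have := hl₁ p hp
                simp only [Bool.not_eq_true'] at this
                rw [hrest, ← List.isPrefixOf_iff_prefix]
                simp [this]
              have hR : ∀ p ∈ l₁, ∀ b ∈ propSuff pm.1, ¬ b <+: p.1 := by
                have hpw := hC3
                rw [hps] at hpw
                have := (List.pairwise_append.mp hpw).2.2
                intro p hp b hb
                exact this p hp pm (by simp) b hb
              have hsub1 : ∀ p ∈ l₁, p ∈ ps := by
                intro p hp; rw [hps]; simp [hp]
              have hsub2 : ∀ p ∈ l₂, p ∈ ps := by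
                intro p hp; rw [hps]; simp [hp]
              -- step A: the passes before the matching pair walk over the matched key
              have stepA : foldRep l₁ (pm.1 ++ rest) = pm.1 ++ foldRep l₁ rest :=
                skipFold hD hC1 hpmem hkne rest l₁ hsub1 hq1 hR rest (fun _ _ h => h)
              -- step B: the matching pass replaces the key occurrence
              have stepB : rep pm.1 pm.2 (pm.1 ++ foldRep l₁ rest)
                  = pm.2 ++ rep pm.1 pm.2 (foldRep l₁ rest) := rep_pos _ _ _ hkne
              -- step C: the later passes walk over the inserted value
              have stepC : foldRep l₂ (pm.2 ++ rep pm.1 pm.2 (foldRep l₁ rest))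
                  = pm.2 ++ foldRep l₂ (rep pm.1 pm.2 (foldRep l₁ rest)) :=
                skipTgt hE hpmem l₂ hsub2 _
              have hsplit : ∀ x, foldRep ps x = foldRep l₂ (rep pm.1 pm.2 (foldRep l₁ x)) := by
                intro x
                rw [hps]
                simp [foldRep, List.foldl_append]
              have hrl : rest.length ≤ n := by
                have h1 := congrArg List.length hrest
                simp at h1 hl
                have h2 : 1 ≤ pm.1.length := by
                  cases hk : pm.1 with
                  | nil => exact absurd hk hkne
                  | cons a k' => simp
                omega
              calc foldRep ps (c :: t)
                  = foldRep l₂ (rep pm.1 pm.2 (foldRep l₁ (pm.1 ++ rest))) := by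
                    rw [hsplit, hrest]
                _ = pm.2 ++ foldRep ps rest := by
                    rw [stepA, stepB, stepC, hsplit]
                _ = pm.2 ++ scanC ps rest := by rw [ih rest hrl]
                _ = scanC ps (c :: t) := by
                    rw [scanC_cons_some hf]
                    congr 1
                    congr 1
                    -- t.drop (pm.1.length - 1) = rest
                    have : pm.1 ++ rest = c :: t := hrest
                    cases hk : pm.1 with
                    | nil => exact absurd hk hkne
                    | cons a k' =>
                        rw [hk] at this
                        simp at this
                        simp [← this.2]

-- the five interference-freedom facts of the twelve literal pairs
set_option maxHeartbeats 4000000 in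
set_option maxRecDepth 100000 in
theorem hNE_P : ∀ p ∈ P, p.1 ≠ [] := by decide

set_option maxHeartbeats 4000000 in
set_option maxRecDepth 100000 in
theorem hD_P : ∀ p ∈ P, ∀ b ∈ SuffList P, ¬ b <+: p.2 ∧ ¬ p.2 <+: b := by decide

set_option maxHeartbeats 4000000 in
set_option maxRecDepth 100000 in
theorem hE_P : ∀ p ∈ P, ∀ u ∈ TgtSuff P, ¬ p.1 <+: u ∧ ¬ u <+: p.1 := by decide

set_option maxHeartbeats 4000000 in
set_option maxRecDepth 100000 in
theorem hC1_P : ∀ p ∈ P, ∀ b ∈ SuffList P, ¬ p.1 <+: b := by decide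

set_option maxHeartbeats 4000000 in
set_option maxRecDepth 100000 in
theorem hC3_P : P.Pairwise (fun p q => ∀ b ∈ propSuff q.1, ¬ b <+: p.1) := by decide

-- PySem.Chars.replace agrees with the structural form rep
theorem go_eq (k v : List Char) (hk : k ≠ []) :
    ∀ fuel (s acc : List Char), s.length ≤ fuel →
      PySem.Chars.replace.go k v fuel s acc = acc.reverse ++ rep k v s := by
  intro fuel
  induction fuel with
  | zero =>
      intro s acc hl
      have : s = [] := List.length_eq_zero_iff.mp (Nat.le_zero.mp hl)
      subst this
      rw [PySem.Chars.replace.go.eq_def]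
      simp [rep_nil]
  | succ fuel ih =>
      intro s acc hl
      cases s with
      | nil =>
          rw [PySem.Chars.replace.go.eq_def]
          simp [rep_nil]
      | cons c t =>
          rw [PySem.Chars.replace.go.eq_def]
          simp only []
          by_cases hp : k.isPrefixOf (c :: t)
          · rw [if_pos hp]
            have hk1 : 1 ≤ k.length := by
              cases hkk : k with
              | nil => exact absurd hkk hk
              | cons a k' => simp
            have hlen : (List.drop k.length (c :: t)).length ≤ fuel := by
              simp at hl ⊢
              omega
            rw [ih _ _ hlen]
            conv_rhs => rw [rep]
            rw [if_pos hp]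
            have hdrop : List.drop k.length (c :: t) = t.drop (k.length - 1) := by
              cases hkk : k with
              | nil => exact absurd hkk hk
              | cons a k' => simp
            rw [hdrop]
            simp
          · rw [if_neg hp]
            have hlen : t.length ≤ fuel := by simp at hl; omega
            rw [ih _ _ hlen]
            rw [rep_cons_neg _ _ _ _ (by simpa [List.isPrefixOf_iff_prefix] using hp)]
            simp

theorem creplace_eq (k v s : List Char) (hk : k ≠ []) :
    PySem.Chars.replace s k v = rep k v s := by
  rw [PySem.Chars.replace]
  rw [if_neg (by simpa [List.isEmpty_iff] using hk)]
  simpa using go_eq k v hk s.length s [] le_rfl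

-- A's six-pass loop (two replaces per pass), pushed to List Char level
theorem fold_toList :
    ∀ (qs : List (String × String)),
      (∀ p ∈ qs, p.1.toList ≠ [] ∧ (pyTitle p.1).toList ≠ []) →
      ∀ (s : String),
      (qs.foldl (fun s p =>
          PySem.Str.replace (PySem.Str.replace s p.1 p.2) (pyTitle p.1) (pyTitle p.2)) s).toList
        = foldRep (qs.flatMap (fun p =>
            [(p.1.toList, p.2.toList), ((pyTitle p.1).toList, (pyTitle p.2).toList)])) s.toList := by
  intro qs
  induction qs with
  | nil => intro _ s; rfl
  | cons q qs ih =>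
      intro h s
      have h1 := (h q (by simp)).1
      have h2 := (h q (by simp)).2
      rw [List.foldl_cons, ih (fun p hp => h p (by simp [hp]))]
      have : (PySem.Str.replace (PySem.Str.replace s q.1 q.2) (pyTitle q.1) (pyTitle q.2)).toList
          = rep (pyTitle q.1).toList (pyTitle q.2).toList (rep q.1.toList q.2.toList s.toList) := by
        rw [PySem.Str.toList_replace, PySem.Str.toList_replace, creplace_eq _ _ _ h1,
          creplace_eq _ _ _ h2]
      rw [this]
      rfl

-- B's scan, pushed to List Char level
theorem subScan_eq (qs : List (String × String)) :
    ∀ n (cs : List Char), cs.length ≤ n →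
      subScan qs cs = scanC (qs.map (fun p => (p.1.toList, p.2.toList))) cs := by
  intro n
  induction n with
  | zero =>
      intro cs hl
      have : cs = [] := List.length_eq_zero_iff.mp (Nat.le_zero.mp hl)
      subst this
      rw [subScan, scanC]
  | succ n ih =>
      intro cs hl
      cases cs with
      | nil => rw [subScan, scanC]
      | cons c t =>
          rw [subScan, scanC]
          rw [List.find?_map]
          have hcomp : ((fun p : List Char × List Char => p.1.isPrefixOf (c :: t)) ∘
              (fun p : String × String => (p.1.toList, p.2.toList)))
              = (fun p : String × String => p.1.toList.isPrefixOf (c :: t)) := rfl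
          rw [hcomp]
          cases hf : qs.find? (fun p => p.1.toList.isPrefixOf (c :: t)) with
          | none =>
              simp only [Option.map_none]
              rw [ih t (by simp at hl; omega)]
          | some p =>
              simp only [Option.map_some]
              rw [ih _ (by
                have h1 : (t.drop (p.1.toList.length - 1)).length ≤ t.length := by
                  simp
                simp at hl
                omega)]

-- ===== VERDICT (by name: the statement is the Claim_ definition above) =====
theorem simplify_text_spec : Claim_equal_simplify_text := by
  unfold Claim_equal_simplify_text Spec_simplify_text
  intro text _
  unfold simplify_text simplify_text_alt
  by_cases h : PySem.Str.strip (if text = "" then "" else text) = ""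
  · simp [h]
  · simp only [if_neg h]
    set t := PySem.Str.strip (if text = "" then "" else text) with ht
    have tableEq : (replacementsB.foldl
        (fun acc p => acc ++ [(p.1, p.2), (pyTitle p.1, pyTitle p.2)])
        ([] : List (String × String))) = tableLit := by decide
    have hmid : (replacementsA.foldl (fun s p =>
        PySem.Str.replace (PySem.Str.replace s p.1 p.2) (pyTitle p.1) (pyTitle p.2)) t)
        = String.ofList (subScan tableLit t.toList) := by
      apply String.toList_inj.mp
      rw [fold_toList replacementsA (by decide) t]
      have hPA : (replacementsA.flatMap (fun p =>
          [(p.1.toList, p.2.toList), ((pyTitle p.1).toList, (pyTitle p.2).toList)])) = P := by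
        decide
      rw [hPA]
      rw [main hNE_P hD_P hE_P hC1_P hC3_P t.toList.length t.toList le_rfl]
      rw [subScan_eq tableLit t.toList.length t.toList le_rfl]
      simp [P]
    rw [tableEq, hmid]
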